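-- pv_equiv track=rewrite | github.com/tenstorrent/tt-inference-server | scripts/release/release_performance.py | _build_benchmark_check_columns
-- ===== SOURCE A (Python) =====
-- from typing import Any, Dict, Iterable, List, Optional, Sequence, Tuple
--
-- def _build_benchmark_check_columns(target_checks: Any) -> List[tuple]:
--     if not isinstance(target_checks, dict):
--         return []
--
--     check_columns = [
--         (
--             f"{target_name}_{metric}",
--             " ".join(
--                 word.upper() if word.lower() == "ttft" else word.capitalize()
--                 for word in f"{target_name}_{metric}".split("_")
--             )
--             + (
--                 ""
--                 if metric.endswith("_check") or metric.endswith("_ratio")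
--                 else " (ms)"
--                 if metric.startswith("ttft")
--                 else " (TPS)"
--                 if metric.startswith("tput")
--                 else ""
--             ),
--         )
--         for target_name in target_checks.keys()
--         for metric in ("ttft_check", "tput_user_check", "ttft", "tput_user")
--     ]
--     check_columns.sort(key=lambda column: not column[0].endswith("_check"))
--     return check_columns
-- ===== SOURCE B (Python) =====
-- from typing import Any, List
--
--
-- def _format_column_label(name: str, suffix: str) -> str:
--     words = [
--         word.upper() if word.lower() == "ttft" else word.capitalize()
--         for word in name.split("_")
--     ]
--     return " ".join(words) + suffix
--
--
-- def _build_benchmark_check_columns(target_checks: Any) -> List[tuple]: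
--     if not isinstance(target_checks, dict):
--         return []
--
--     columns = []
--     # First pass: the *_check columns for every target (suffix-free labels).
--     for target_name in target_checks.keys():
--         for metric in ("ttft_check", "tput_user_check"):
--             name = f"{target_name}_{metric}"
--             columns.append((name, _format_column_label(name, "")))
--     # Second pass: the plain metric columns with their unit suffixes.
--     for target_name in target_checks.keys():
--         for metric, suffix in (("ttft", " (ms)"), ("tput_user", " (TPS)")):
--             name = f"{target_name}_{metric}"
--             columns.append((name, _format_column_label(name, suffix)))
--     return columns
-- ===== Notes on version B (the rewrite author's own statement) =====
-- stated objective: simpler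
-- what changed: Replaced the build-all-columns-then-stable-sort-by-not-endswith pipeline with two direct passes over the target keys (check columns first, then unit-suffixed columns), producing the grouped order by construction with no sort call and a shared label-formatting helper.
import Mathlib
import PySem

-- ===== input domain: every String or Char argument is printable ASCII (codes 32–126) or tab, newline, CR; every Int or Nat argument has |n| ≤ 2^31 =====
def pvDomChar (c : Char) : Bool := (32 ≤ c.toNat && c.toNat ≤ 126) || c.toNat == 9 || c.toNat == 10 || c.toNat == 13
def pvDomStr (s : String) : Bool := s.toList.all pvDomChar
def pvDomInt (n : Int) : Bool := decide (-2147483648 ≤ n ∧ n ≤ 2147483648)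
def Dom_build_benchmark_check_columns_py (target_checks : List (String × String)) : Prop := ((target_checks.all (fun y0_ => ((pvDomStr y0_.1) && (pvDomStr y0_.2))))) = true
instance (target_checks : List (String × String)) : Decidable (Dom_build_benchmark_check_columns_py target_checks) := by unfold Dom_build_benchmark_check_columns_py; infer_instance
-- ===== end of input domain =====

-- B replaces A's build-then-stable-sort with two direct passes (check columns, then unit-suffixed
-- columns), which produces the sorted order by construction; objective: simpler, same cost.

-- ===== PORT A =====
-- Python str.capitalize(): first char uppercased, the rest lowercased (exact on the ASCII domain;
-- ported by hand — PySem has no capitalize primitive).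
def pvCapitalize (w : String) : String :=
  match w.toList with
  | [] => ""
  | c :: rest => String.ofList (PySem.Chars.upperChar c :: rest.map PySem.Chars.lowerChar)

-- 'word.upper() if word.lower() == "ttft" else word.capitalize()' (shared verbatim by both Pythons)
def pvFormatWord (w : String) : String :=
  if PySem.Str.lower w = "ttft" then PySem.Str.upper w else pvCapitalize w

-- A's suffix conditional over the metric string
def pvMetricSuffix (metric : String) : String :=
  if PySem.Str.endswith metric "_check" || PySem.Str.endswith metric "_ratio" then ""
  else if PySem.Str.startswith metric "ttft" then " (ms)"
  else if PySem.Str.startswith metric "tput" then " (TPS)"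
  else ""

-- one comprehension element of A; split? "_" is always `some` since the separator is nonempty
def pvColA (target metric : String) : String × String :=
  let name := target ++ "_" ++ metric
  (name,
    PySem.Str.join " " (((PySem.Str.split? name "_").getD []).map pvFormatWord)
      ++ pvMetricSuffix metric)

def build_benchmark_check_columns_py (target_checks : List (String × String)) : List (String × String) :=
  let check_columns :=
    (PySem.Dict.ofList target_checks).keys.flatMap
      (fun target_name =>
        ["ttft_check", "tput_user_check", "ttft", "tput_user"].map (fun m => pvColA target_name m))
  PySem.List.sorted check_columns (fun column => !(PySem.Str.endswith column.1 "_check")) false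

-- ===== PORT B =====
-- Source B's _format_column_label applied to the already-built name, with the suffix passed in
def pvColB (target metric suffix : String) : String × String :=
  let name := target ++ "_" ++ metric
  (name,
    PySem.Str.join " " (((PySem.Str.split? name "_").getD []).map pvFormatWord) ++ suffix)

def build_benchmark_check_columns_py_alt (target_checks : List (String × String)) : List (String × String) :=
  let keys := (PySem.Dict.ofList target_checks).keys
  keys.flatMap (fun t => [pvColB t "ttft_check" "", pvColB t "tput_user_check" ""])
    ++ keys.flatMap (fun t => [pvColB t "ttft" " (ms)", pvColB t "tput_user" " (TPS)"])

-- ===== PRECONDITION & SPEC =====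
def Spec_build_benchmark_check_columns_py (target_checks : List (String × String)) (out : List (String × String)) : Prop := out = build_benchmark_check_columns_py_alt target_checks
instance (target_checks : List (String × String)) (out : List (String × String)) : Decidable (Spec_build_benchmark_check_columns_py target_checks out) := by unfold Spec_build_benchmark_check_columns_py; infer_instance

-- ===== CLAIM (what is proved, stated in full; the proofs are below) =====
def Claim_equal_build_benchmark_check_columns_py : Prop := ∀ (target_checks : List (String × String)), Dom_build_benchmark_check_columns_py target_checks → Spec_build_benchmark_check_columns_py target_checks (build_benchmark_check_columns_py target_checks)

-- ===== LEMMAS AND PROOFS =====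

-- inserting an element that must go before the (true-keyed) tail lands right after the false block
theorem insertBy_append_mid {α : Type} (before : α → α → Bool) (x : α) (F T : List α)
    (hF : ∀ y ∈ F, before x y = false) (hT : T = [] ∨ ∃ t T', T = t :: T' ∧ before x t = true) :
    PySem.List.insertBy before x (F ++ T) = F ++ x :: T := by
  induction F with
  | nil =>
    rcases hT with rfl | ⟨t, T', rfl, ht⟩
    · simp [PySem.List.insertBy]
    · simp [PySem.List.insertBy, ht]
  | cons y F ih =>
    have hy : before x y = false := hF y (by simp)
    simp only [List.cons_append, PySem.List.insertBy, hy]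
    simp [ih (fun z hz => hF z (by simp [hz]))]

-- the stable insertion-sort by a Bool key is exactly "false block, then true block"
theorem foldl_insertBy_bool {α : Type} (key : α → Bool) (xs F T : List α)
    (hF : ∀ y ∈ F, key y = false) (hT : ∀ y ∈ T, key y = true) :
    xs.foldl (fun acc x => PySem.List.insertBy (fun a b => decide (key a < key b)) x acc) (F ++ T)
      = (F ++ xs.filter (fun x => !key x)) ++ (T ++ xs.filter key) := by
  induction xs generalizing F T with
  | nil => simp
  | cons x xs ih =>
    by_cases hx : key x = true
    · have h1 : PySem.List.insertBy (fun a b => decide (key a < key b)) x (F ++ T)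
          = (F ++ T) ++ [x] := by
        apply PySem.List.insertBy_of_forall_not_before
        intro y hy
        simp only [hx]
        cases key y <;> decide
      simp only [List.foldl_cons, h1, List.append_assoc]
      rw [ih F (T ++ [x]) hF
        (by intro y hy
            rcases List.mem_append.1 hy with h | h
            · exact hT y h
            · simp at h; simpa [h] using hx)]
      simp [hx]
    · have hx' : key x = false := by simpa using hx
      have h1 : PySem.List.insertBy (fun a b => decide (key a < key b)) x (F ++ T)
          = (F ++ [x]) ++ T := by
        rw [show (F ++ [x]) ++ T = F ++ x :: T by simp]
        apply insertBy_append_mid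
        · intro y hy
          simp only [hx']
          rw [hF y hy]
          decide
        · cases T with
          | nil => exact Or.inl rfl
          | cons t T' =>
            refine Or.inr ⟨t, T', rfl, ?_⟩
            simp only [hx']
            rw [hT t (by simp)]
            decide
      simp only [List.foldl_cons, h1]
      rw [ih (F ++ [x]) T
        (by intro y hy
            rcases List.mem_append.1 hy with h | h
            · exact hF y h
            · simp at h; simpa [h] using hx') hT]
      simp [hx']

theorem sorted_bool_split {α : Type} (xs : List α) (key : α → Bool) :
    PySem.List.sorted xs key false = xs.filter (fun x => !key x) ++ xs.filter key := by
  rw [PySem.List.sorted_eq_foldl_insertBy]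
  simpa using foldl_insertBy_bool key xs [] [] (by simp) (by simp)

-- names built from the check metrics end with "_check" …
theorem chars_endswith_append_true (t m : List Char)
    (h : ['_','c','h','e','c','k'] <:+ m) :
    PySem.Chars.endswith (t ++ m) ['_','c','h','e','c','k'] = true := by
  simp only [PySem.Chars.endswith, List.isSuffixOf_iff_suffix]
  exact List.suffix_append_of_suffix h

-- … and names built from the plain metrics do not (their last character differs from 'k')
theorem chars_endswith_append_false (t m : List Char) (c : Char)
    (hc : m.getLast? = some c) (hck : c ≠ 'k') :
    PySem.Chars.endswith (t ++ m) ['_','c','h','e','c','k'] = false := by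
  simp only [PySem.Chars.endswith]
  rw [Bool.eq_false_iff]
  intro h
  obtain ⟨pre, hpre⟩ := List.isSuffixOf_iff_suffix.mp h
  have h1 : (pre ++ ['_','c','h','e','c','k']).getLast? = some 'k' := by
    rw [List.getLast?_append]; rfl
  rw [hpre, List.getLast?_append, hc] at h1
  simp [Option.or] at h1
  exact hck h1

theorem flatMap_ext {α β : Type} (l : List α) (f g : α → List β) (h : ∀ x, f x = g x) :
    l.flatMap f = l.flatMap g := by
  have : f = g := funext h
  rw [this]

-- ===== VERDICT (by name: the statement is the Claim_ definition above) =====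
theorem build_benchmark_check_columns_py_spec : Claim_equal_build_benchmark_check_columns_py := by
  intro target_checks _
  unfold Spec_build_benchmark_check_columns_py
  unfold build_benchmark_check_columns_py build_benchmark_check_columns_py_alt
  rw [sorted_bool_split, List.filter_flatMap, List.filter_flatMap]
  have h1 : ∀ t : String, PySem.Chars.endswith
      (t.toList ++ ['_','t','t','f','t','_','c','h','e','c','k']) ['_','c','h','e','c','k'] = true :=
    fun t => chars_endswith_append_true _ _ (by decide)
  have h2 : ∀ t : String, PySem.Chars.endswith
      (t.toList ++ ['_','t','p','u','t','_','u','s','e','r','_','c','h','e','c','k'])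
      ['_','c','h','e','c','k'] = true :=
    fun t => chars_endswith_append_true _ _ (by decide)
  have h3 : ∀ t : String, PySem.Chars.endswith
      (t.toList ++ ['_','t','t','f','t']) ['_','c','h','e','c','k'] = false :=
    fun t => chars_endswith_append_false _ _ 't' (by decide) (by decide)
  have h4 : ∀ t : String, PySem.Chars.endswith
      (t.toList ++ ['_','t','p','u','t','_','u','s','e','r']) ['_','c','h','e','c','k'] = false :=
    fun t => chars_endswith_append_false _ _ 'r' (by decide) (by decide)
  congr 1
  · apply flatMap_ext; intro t
    simp [pvColA, pvColB, h1 t, h2 t, h3 t, h4 t,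
      show pvMetricSuffix "ttft_check" = "" from by decide,
      show pvMetricSuffix "tput_user_check" = "" from by decide]
  · apply flatMap_ext; intro t
    simp [pvColA, pvColB, h1 t, h2 t, h3 t, h4 t,
      show pvMetricSuffix "ttft" = " (ms)" from by decide,
      show pvMetricSuffix "tput_user" = " (TPS)" from by decide]
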